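-- pv_equiv track=rewrite | github.com/turishev/py-harp | src/pyharp/scale.py | create_inversions
-- ===== SOURCE A (Python) =====
-- def create_inversions(scale : list[int]) -> list[list[int]]:
--     '''
--     scale : list[int], ordered scale degrees list
--     return : list[list[int]], its items all are cyclic shifted original scale
--     '''
--     result = [scale]
--     for _ in range(0, len(scale) - 1):
--         prev = result[-1]
--         next = prev[1:]
--         next.append(prev[0] + 12)
--         oct_num = next[0] // 12
--         next_norm = next if oct_num == 0 else [x - oct_num * 12 for x in next]
--         result.append(next_norm)
--     return result
-- ===== SOURCE B (Python) =====
-- def create_inversions(scale : list[int]) -> list[list[int]]: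
--     '''
--     scale : list[int], ordered scale degrees list
--     return : list[list[int]], its items all are cyclic shifted original scale
--     '''
--     def inversion(i):
--         raw = scale[i:] + [x + 12 for x in scale[:i]]
--         o = raw[0] // 12
--         return raw if o == 0 else [x - o * 12 for x in raw]
--     return [scale] + [inversion(i) for i in range(1, len(scale))]
-- ===== Notes on version B (the rewrite author's own statement) =====
-- stated objective: simpler
-- what changed: Each inversion is computed independently from the original scale by index (rotate-by-i with +12 on the wrapped prefix, then normalise by the first element's octave), instead of deriving each list from the previously appended one through an accumulator.
import Mathlib
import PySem

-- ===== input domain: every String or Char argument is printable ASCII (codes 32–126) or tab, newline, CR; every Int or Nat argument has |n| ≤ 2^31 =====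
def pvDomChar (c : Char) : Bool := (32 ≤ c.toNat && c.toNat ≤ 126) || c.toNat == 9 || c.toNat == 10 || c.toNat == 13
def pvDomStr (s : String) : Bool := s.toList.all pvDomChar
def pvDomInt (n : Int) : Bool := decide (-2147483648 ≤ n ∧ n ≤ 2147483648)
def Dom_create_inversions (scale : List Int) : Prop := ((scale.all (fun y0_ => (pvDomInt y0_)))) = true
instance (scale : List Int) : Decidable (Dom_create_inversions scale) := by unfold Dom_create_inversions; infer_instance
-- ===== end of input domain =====

-- B computes each inversion independently from the original scale by index (rotate + normalise),
-- replacing A's accumulator that derives each list from the previously appended one; objective: simpler.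

-- ===== PORT A =====
-- the for-loop of A: one call per iteration of `for _ in range(0, len(scale)-1)`
def createInvLoopA (result : List (List Int)) : Nat → List (List Int)
  | 0 => result
  | k + 1 =>
    let prev := result.getLastD []          -- result[-1] (result is never empty)
    let next := prev.tail ++ [prev.headI + 12]   -- prev[1:] then .append(prev[0]+12); prev[0]=headI (prev nonempty in A)
    let octNum := PySem.Int.floordiv next.headI 12
    let nextNorm := if octNum = 0 then next else next.map (fun x => x - octNum * 12)
    createInvLoopA (result ++ [nextNorm]) k

def create_inversions (scale : List Int) : List (List Int) :=
  createInvLoopA [scale] (scale.length - 1)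

-- ===== PORT B =====
def inversionAtB (scale : List Int) (i : Nat) : List Int :=
  let raw := PySem.List.slice scale (some (i : Int)) none
             ++ (PySem.List.slice scale none (some (i : Int))).map (fun x => x + 12)
  let o := PySem.Int.floordiv (PySem.List.pyGetD raw 0 0) 12
  if o = 0 then raw else raw.map (fun x => x - o * 12)

def create_inversions_alt (scale : List Int) : List (List Int) :=
  [scale] ++ (List.range' 1 (scale.length - 1)).map (inversionAtB scale)

-- ===== PRECONDITION & SPEC =====
def Spec_create_inversions (scale : List Int) (out : List (List Int)) : Prop := out = create_inversions_alt scale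
instance (scale : List Int) (out : List (List Int)) : Decidable (Spec_create_inversions scale out) := by unfold Spec_create_inversions; infer_instance

-- ===== CLAIM (what is proved, stated in full; the proofs are below) =====
def Claim_equal_create_inversions : Prop := ∀ (scale : List Int), Dom_create_inversions scale → Spec_create_inversions scale (create_inversions scale)

-- ===== LEMMAS AND PROOFS =====

-- the i-th raw rotation and its normalised form
def rawRot (scale : List Int) (i : Nat) : List Int :=
  scale.drop i ++ (scale.take i).map (fun x => x + 12)

def invF (scale : List Int) (i : Nat) : List Int :=
  (rawRot scale i).map (fun x => x - (PySem.Int.floordiv (rawRot scale i).headI 12) * 12)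

lemma length_rawRot (scale : List Int) (i : Nat) (h : i ≤ scale.length) :
    (rawRot scale i).length = scale.length := by
  simp [rawRot]; omega

lemma pyGetD_zero_headI (l : List Int) : PySem.List.pyGetD l 0 0 = l.headI := by
  cases l <;> simp [PySem.List.pyGetD, PySem.List.pyGet?, PySem.List.pyIdx?]

lemma map_sub_zero (l : List Int) : l.map (fun x => x - (0 : Int) * 12) = l := by
  simp

-- B's per-index function equals the always-normalising form
lemma inversionAtB_eq_invF (scale : List Int) (i : Nat) :
    inversionAtB scale i = invF scale i := by
  simp only [inversionAtB, invF, PySem.List.slice_from_natCast, PySem.List.slice_to_natCast,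
    pyGetD_zero_headI]
  show (if PySem.Int.floordiv (rawRot scale i).headI 12 = 0 then rawRot scale i
        else (rawRot scale i).map (fun x => x - PySem.Int.floordiv (rawRot scale i).headI 12 * 12))
      = _
  split_ifs with h
  · rw [h, map_sub_zero]
  · rfl

lemma fdiv_sub_mul (h c : Int) :
    PySem.Int.floordiv (h - c * 12) 12 = PySem.Int.floordiv h 12 - c := by
  rw [PySem.Int.floordiv_eq_ediv_of_pos (by norm_num : (0:Int) < 12),
      PySem.Int.floordiv_eq_ediv_of_pos (by norm_num : (0:Int) < 12)]
  have : h - c * 12 = h + (-c) * 12 := by ring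
  rw [this, Int.add_mul_ediv_right _ _ (by norm_num)]
  ring

lemma rawRot_succ (scale : List Int) (i : Nat) (hi : i < scale.length) :
    (rawRot scale i).tail ++ [(rawRot scale i).headI + 12] = rawRot scale (i + 1) := by
  unfold rawRot
  rw [List.drop_eq_getElem_cons hi, List.take_add_one, List.getElem?_eq_getElem hi]
  simp only [List.cons_append, List.tail_cons, List.headI_cons, Option.toList_some,
    List.map_append, List.map_cons, List.map_nil, List.append_assoc]

lemma headI_map_sub (l : List Int) (c : Int) (h : l ≠ []) :
    (l.map (fun x => x - c * 12)).headI = l.headI - c * 12 := by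
  cases l with
  | nil => exact absurd rfl h
  | cons a t => simp

lemma step_eq (scale : List Int) (i : Nat) (c : Int) (hi : i + 1 < scale.length) :
    (let prev := (rawRot scale i).map (fun x => x - c * 12)
     let next := prev.tail ++ [prev.headI + 12]
     let octNum := PySem.Int.floordiv next.headI 12
     if octNum = 0 then next else next.map (fun x => x - octNum * 12))
    = invF scale (i + 1) := by
  have hne : rawRot scale i ≠ [] := by
    have := length_rawRot scale i (by omega)
    intro h; rw [h] at this; simp at this; omega
  have hne' : rawRot scale (i + 1) ≠ [] := by
    have := length_rawRot scale (i + 1) (by omega)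
    intro h; rw [h] at this; simp at this; omega
  have hnext : ((rawRot scale i).map (fun x => x - c * 12)).tail
        ++ [((rawRot scale i).map (fun x => x - c * 12)).headI + 12]
      = (rawRot scale (i + 1)).map (fun x => x - c * 12) := by
    rw [headI_map_sub _ _ hne, List.map_tail.symm, ← rawRot_succ scale i (by omega)]
    simp only [List.map_append, List.map_cons, List.map_nil]
    congr 2
    ring
  simp only [hnext]
  rw [headI_map_sub _ _ hne', fdiv_sub_mul]
  set h0 := (rawRot scale (i + 1)).headI with hh0
  unfold invF
  rw [← hh0]
  split_ifs with h
  · apply List.map_congr_left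
    intro x _
    have hc : PySem.Int.floordiv h0 12 = c := by omega
    rw [hc]
  · rw [List.map_map]
    apply List.map_congr_left
    intro x _
    simp only [Function.comp_apply]
    ring

lemma loop_inv (scale : List Int) :
    ∀ (k i : Nat) (c : Int) (acc : List (List Int)), i + k < scale.length →
    createInvLoopA (acc ++ [(rawRot scale i).map (fun x => x - c * 12)]) k
      = acc ++ (rawRot scale i).map (fun x => x - c * 12)
          :: (List.range' (i + 1) k).map (invF scale) := by
  intro k
  induction k with
  | zero => intro i c acc _; simp [createInvLoopA]
  | succ k ih =>
    intro i c acc hik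
    rw [createInvLoopA]
    simp only [List.getLastD_concat]
    rw [show (∀ p : List Int,
        (let next := p.tail ++ [p.headI + 12]
         let octNum := PySem.Int.floordiv next.headI 12
         if octNum = 0 then next else next.map (fun x => x - octNum * 12)) =
        (let next := p.tail ++ [p.headI + 12];
         if PySem.Int.floordiv next.headI 12 = 0 then next
         else next.map (fun x => x - PySem.Int.floordiv next.headI 12 * 12))) from fun _ => rfl]
    rw [step_eq scale i c (by omega)]
    have hf : invF scale (i + 1)
        = (rawRot scale (i + 1)).map
            (fun x => x - (PySem.Int.floordiv (rawRot scale (i + 1)).headI 12) * 12) := rfl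
    rw [hf, ih (i + 1) _ (acc ++ [(rawRot scale i).map (fun x => x - c * 12)]) (by omega)]
    rw [List.range'_succ, List.map_cons, hf]
    simp [List.append_assoc]

lemma alt_eq_map (scale : List Int) :
    create_inversions_alt scale = scale :: (List.range' 1 (scale.length - 1)).map (invF scale) := by
  unfold create_inversions_alt
  simp [List.map_congr_left (fun i _ => inversionAtB_eq_invF scale i)]

-- ===== VERDICT (by name: the statement is the Claim_ definition above) =====
theorem create_inversions_spec : Claim_equal_create_inversions := by
  intro scale _
  show create_inversions scale = create_inversions_alt scale
  rw [alt_eq_map]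
  unfold create_inversions
  by_cases hs : scale = []
  · subst hs
    simp [createInvLoopA]
  · have hn : 1 ≤ scale.length := List.length_pos_of_ne_nil hs
    have h0 : scale = (rawRot scale 0).map (fun x => x - (0 : Int) * 12) := by
      simp [rawRot]
    calc createInvLoopA [scale] (scale.length - 1)
        = createInvLoopA ([] ++ [(rawRot scale 0).map (fun x => x - (0 : Int) * 12)])
            (scale.length - 1) := by rw [← h0]; rfl
      _ = [] ++ (rawRot scale 0).map (fun x => x - (0 : Int) * 12)
            :: (List.range' 1 (scale.length - 1)).map (invF scale) :=
            loop_inv scale (scale.length - 1) 0 0 [] (by omega)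
      _ = scale :: (List.range' 1 (scale.length - 1)).map (invF scale) := by rw [← h0]; rfl
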